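-- pv_equiv track=rewrite | github.com/MaterSim/PyXtal | pyxtal/symmetry.py | jk_from_i
-- ===== SOURCE A (Python) =====
-- def jk_from_i(i, olist):
--     """
--     Given an organized list (Wyckoff positions or orientations), determine the
--     two indices which correspond to a single index for an unorganized list.
--     Used mainly for organized Wyckoff position lists, but can be used for other
--     lists organized in a similar way
--
--     Args:
--         i: a single index corresponding to the item's location in the
--             unorganized list
--         olist: the organized list
--
--     Returns:
--         [j, k]: two indices corresponding to the item's location in the
--             organized list
--     """
--     num = -1
--     for j, a in enumerate(olist):
--         for k, _b in enumerate(a):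
--             num += 1
--             if num == i:
--                 return [j, k]
--     return None
-- ===== SOURCE B (Python) =====
-- def jk_from_i(i, olist):
--     """Locate flat index i in nested list olist by subtracting sublist
--     lengths, instead of scanning every element one by one."""
--     if i < 0:
--         return None
--     for j, a in enumerate(olist):
--         n = len(a)
--         if i < n:
--             return [j, i]
--         i -= n
--     return None
-- ===== Notes on version B (the rewrite author's own statement) =====
-- stated objective: alternative
-- what changed: B subtracts whole sublist lengths (one step per sublist) instead of A's per-element counter scan; intended as faster but measured only ~1.5x at the largest size.
import Mathlib
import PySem

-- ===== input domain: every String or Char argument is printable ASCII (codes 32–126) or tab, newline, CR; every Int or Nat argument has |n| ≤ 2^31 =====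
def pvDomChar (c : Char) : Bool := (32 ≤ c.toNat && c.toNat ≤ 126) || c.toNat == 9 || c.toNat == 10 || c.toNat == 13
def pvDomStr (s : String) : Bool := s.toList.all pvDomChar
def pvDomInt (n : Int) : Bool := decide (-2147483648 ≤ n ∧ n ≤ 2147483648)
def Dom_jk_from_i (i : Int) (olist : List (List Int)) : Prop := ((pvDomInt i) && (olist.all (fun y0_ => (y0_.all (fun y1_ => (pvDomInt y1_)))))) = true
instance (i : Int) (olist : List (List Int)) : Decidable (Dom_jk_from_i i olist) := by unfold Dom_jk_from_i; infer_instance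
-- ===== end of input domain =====

-- B replaces A's per-element counter scan by subtracting whole sublist lengths, one step per sublist.

-- ===== PORT A =====
-- inner loop 'for k, _b in enumerate(a): num += 1; if num == i: return [j, k]';
-- returns the early result (if any) and the updated counter num
def jkAInner (i j : Int) (k num : Int) : List Int → Option (List Int) × Int
  | [] => (none, num)
  | _ :: rest =>
    let num' := num + 1
    if num' = i then (some [j, k], num') else jkAInner i j (k + 1) num' rest

-- outer loop 'for j, a in enumerate(olist): …'
def jkAOuter (i : Int) (j num : Int) : List (List Int) → Option (List Int)
  | [] => none
  | a :: rest =>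
    match jkAInner i j 0 num a with
    | (some r, _) => some r
    | (none, num') => jkAOuter i (j + 1) num' rest

def jk_from_i (i : Int) (olist : List (List Int)) : Option (List Int) :=
  jkAOuter i 0 (-1) olist

-- ===== PORT B =====
def jkBOuter (i : Int) (j : Int) : List (List Int) → Option (List Int)
  | [] => none
  | a :: rest =>
    if i < (a.length : Int) then some [j, i] else jkBOuter (i - (a.length : Int)) (j + 1) rest

def jk_from_i_alt (i : Int) (olist : List (List Int)) : Option (List Int) :=
  if i < 0 then none else jkBOuter i 0 olist

-- ===== PRECONDITION & SPEC =====
def Spec_jk_from_i (i : Int) (olist : List (List Int)) (out : Option (List Int)) : Prop := out = jk_from_i_alt i olist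
instance (i : Int) (olist : List (List Int)) (out : Option (List Int)) : Decidable (Spec_jk_from_i i olist out) := by unfold Spec_jk_from_i; infer_instance

-- ===== CLAIM (what is proved, stated in full; the proofs are below) =====
def Claim_equal_jk_from_i : Prop := ∀ (i : Int) (olist : List (List Int)), Dom_jk_from_i i olist → Spec_jk_from_i i olist (jk_from_i i olist)

-- ===== LEMMAS AND PROOFS =====

-- inner loop, hit: the counter reaches i inside a
theorem jkAInner_hit (i j : Int) (a : List Int) : ∀ (k num : Int),
    num + 1 ≤ i → i ≤ num + (a.length : Int) →
    (jkAInner i j k num a).1 = some [j, k + (i - num - 1)] := by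
  induction a with
  | nil => intro k num h1 h2; simp at h2; omega
  | cons x rest ih =>
    intro k num h1 h2
    simp only [jkAInner]
    by_cases h : num + 1 = i
    · rw [if_pos h]
      have hk : k + (i - num - 1) = k := by omega
      simp [hk]
    · simp only [h, if_false]
      have := ih (k + 1) (num + 1) (by omega) (by simp only [List.length_cons] at h2; push_cast at h2 ⊢; omega)
      have he : k + 1 + (i - (num + 1) - 1) = k + (i - num - 1) := by omega
      rw [this, he]

-- inner loop, miss: the counter never reaches i; num advances by len(a)
theorem jkAInner_miss (i j : Int) (a : List Int) : ∀ (k num : Int),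
    ¬ (num + 1 ≤ i ∧ i ≤ num + (a.length : Int)) →
    jkAInner i j k num a = (none, num + (a.length : Int)) := by
  induction a with
  | nil => intro k num _; simp [jkAInner]
  | cons x rest ih =>
    intro k num h
    simp only [jkAInner]
    have hne : ¬ (num + 1 = i) := by simp only [List.length_cons] at h; push_cast at h; omega
    simp only [hne, if_false]
    rw [ih (k + 1) (num + 1) (by simp only [List.length_cons] at h; push_cast at h ⊢; omega)]
    simp only [List.length_cons]; congr 1; push_cast; ring

-- if the target is already passed, the outer loop returns none
theorem jkAOuter_passed (i : Int) (l : List (List Int)) : ∀ (j num : Int),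
    i ≤ num → jkAOuter i j num l = none := by
  induction l with
  | nil => intro j num _; rfl
  | cons a rest ih =>
    intro j num h
    simp only [jkAOuter]
    rw [jkAInner_miss i j a 0 num (by omega)]
    exact ih (j + 1) (num + (a.length : Int)) (by omega)

-- main invariant: with remaining offset i - num - 1 ≥ 0, A's outer loop equals B's
theorem jkAOuter_eq_B (i : Int) (l : List (List Int)) : ∀ (j num : Int),
    num + 1 ≤ i → jkAOuter i j num l = jkBOuter (i - num - 1) j l := by
  induction l with
  | nil => intro j num _; rfl
  | cons a rest ih =>
    intro j num h1
    simp only [jkAOuter, jkBOuter]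
    by_cases h2 : i ≤ num + (a.length : Int)
    · rw [show (jkAInner i j 0 num a) =
          ((jkAInner i j 0 num a).1, (jkAInner i j 0 num a).2) from rfl,
        jkAInner_hit i j a 0 num h1 h2]
      have : i - num - 1 < (a.length : Int) := by omega
      simp [this]
    · rw [jkAInner_miss i j a 0 num (by omega)]
      have : ¬ (i - num - 1 < (a.length : Int)) := by omega
      simp only [this, if_false]
      rw [ih (j + 1) (num + (a.length : Int)) (by omega)]
      congr 1; omega

-- ===== VERDICT (by name: the statement is the Claim_ definition above) =====
theorem jk_from_i_spec : Claim_equal_jk_from_i := by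
  intro i olist _
  unfold Spec_jk_from_i jk_from_i jk_from_i_alt
  by_cases h : i < 0
  · simp [h, jkAOuter_passed i olist 0 (-1) (by omega)]
  · simp only [h, if_false]
    have := jkAOuter_eq_B i olist 0 (-1) (by omega)
    simpa using this
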